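-- pv_equiv track=rewrite | github.com/smilejakdu/algorithm | JL/tetra.py | solution
-- ===== SOURCE A (Python) =====
-- def solution(n):
--
--     d = 0
--     number = []
--     answer = 0
--     while (n>=3):
--         d = n%3
--         n = n//3
--         number.append(d)
--
--     number.append(n)
--
--     number.reverse()
--     for i in range(len(number)):
--         answer += number[i] * (3 **i)
--
--
--     return answer
-- ===== SOURCE B (Python) =====
-- def solution(n):
--     return _rev3(n)[0]
--
-- def _rev3(n):
--     # returns (reversed base-3 value of n, 3 ** number-of-digits)
--     if n < 3:
--         return n, 3
--     v, p = _rev3(n // 3)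
--     return v + n % 3 * p, p * 3
-- ===== Notes on version B (the rewrite author's own statement) =====
-- stated objective: alternative
-- what changed: Replaces the build-digit-list + reverse + weighted power-sum loop pipeline with a direct recursion returning a (value, place-weight) pair, so no list, no reverse and no index loop exist.
import Mathlib
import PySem

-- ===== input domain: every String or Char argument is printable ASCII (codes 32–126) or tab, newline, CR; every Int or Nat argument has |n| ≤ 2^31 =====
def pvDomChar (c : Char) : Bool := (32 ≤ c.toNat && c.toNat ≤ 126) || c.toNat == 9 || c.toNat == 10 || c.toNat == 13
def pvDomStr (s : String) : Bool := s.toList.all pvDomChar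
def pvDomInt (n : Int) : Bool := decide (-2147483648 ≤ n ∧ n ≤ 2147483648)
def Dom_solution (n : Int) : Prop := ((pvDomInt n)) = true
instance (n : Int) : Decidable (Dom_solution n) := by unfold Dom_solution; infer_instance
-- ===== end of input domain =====

-- B replaces A's digit-list + reverse + weighted power-sum with a recursion returning a (value, place-weight) pair (alternative decomposition).

-- ===== PORT A =====
-- the while loop: appends n%3 digits while n>=3, then appends the final n
def solutionLoopA (n : Int) (number : List Int) : List Int :=
  if n ≥ 3 then
    solutionLoopA (PySem.Int.floordiv n 3) (number ++ [PySem.Int.mod n 3])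
  else number ++ [n]
termination_by n.toNat
decreasing_by
  have h3 : PySem.Int.floordiv n 3 = n / 3 := PySem.Int.floordiv_eq_ediv_of_pos (by omega)
  rw [h3]; omega

def solution (n : Int) : Int :=
  let number := (solutionLoopA n []).reverse
  -- 'for i in range(len(number)): answer += number[i] * 3**i' — i is always in range, so number[i] is getD
  (List.range number.length).foldl (fun answer i => answer + number.getD i 0 * 3 ^ i) 0

-- ===== PORT B =====
-- _rev3(n): (reversed base-3 value of n, 3 ** number-of-digits)
def rev3 (n : Int) : Int × Int :=
  if n ≥ 3 then
    let vp := rev3 (PySem.Int.floordiv n 3)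
    (vp.1 + PySem.Int.mod n 3 * vp.2, vp.2 * 3)
  else (n, 3)
termination_by n.toNat
decreasing_by
  have h3 : PySem.Int.floordiv n 3 = n / 3 := PySem.Int.floordiv_eq_ediv_of_pos (by omega)
  rw [h3]; omega

def solution_alt (n : Int) : Int := (rev3 n).1

-- ===== PRECONDITION & SPEC =====
def Spec_solution (n : Int) (out : Int) : Prop := out = solution_alt n
instance (n : Int) (out : Int) : Decidable (Spec_solution n out) := by unfold Spec_solution; infer_instance

-- ===== CLAIM (what is proved, stated in full; the proofs are below) =====
def Claim_equal_solution : Prop := ∀ (n : Int), Dom_solution n → Spec_solution n (solution n)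

-- ===== LEMMAS AND PROOFS =====

-- the accumulator of A's loop is a prefix that is only appended to
theorem loopA_append (n : Int) (number : List Int) :
    solutionLoopA n number = number ++ solutionLoopA n [] := by
  induction n using rev3.induct generalizing number with
  | case1 n h ih =>
    conv_lhs => rw [solutionLoopA]
    conv_rhs => rw [solutionLoopA]
    rw [if_pos h, if_pos h, ih, ih ([] ++ [PySem.Int.mod n 3])]
    simp
  | case2 n h =>
    conv_lhs => rw [solutionLoopA]
    conv_rhs => rw [solutionLoopA]
    rw [if_neg h, if_neg h]
    simp

-- folding Horner's step from an arbitrary seed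
theorem horner_init (l : List Int) (a : Int) :
    l.foldl (fun acc d => acc * 3 + d) a
      = a * 3 ^ l.length + l.foldl (fun acc d => acc * 3 + d) 0 := by
  induction l generalizing a with
  | nil => simp
  | cons d t ih =>
    simp only [List.foldl_cons, List.length_cons]
    rw [ih (a * 3 + d), ih (0 * 3 + d)]
    ring

-- A's weighted sum of the reversed digit list is Horner's rule on the list
theorem sum_rev (l : List Int) :
    (List.range l.reverse.length).foldl
        (fun answer i => answer + l.reverse.getD i 0 * 3 ^ i) 0
      = l.foldl (fun acc d => acc * 3 + d) 0 := by
  induction l with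
  | nil => simp
  | cons d t ih =>
    have hlen : (d :: t).reverse.length = t.reverse.length + 1 := by simp
    rw [hlen, List.range_succ, List.foldl_append]
    have hget : (d :: t).reverse.getD t.reverse.length 0 = d := by
      simp [List.reverse_cons, List.getD_eq_getElem?_getD]
    have hcongr :
        (List.range t.reverse.length).foldl
            (fun answer i => answer + (d :: t).reverse.getD i 0 * 3 ^ i) 0
          = (List.range t.reverse.length).foldl
            (fun answer i => answer + t.reverse.getD i 0 * 3 ^ i) 0 := by
      refine PySem.List.foldl_congr_mem _ _ _ _ (fun acc i hi => ?_)
      have hi' : i < t.reverse.length := List.mem_range.mp hi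
      have : (d :: t).reverse.getD i 0 = t.reverse.getD i 0 := by
        simp [List.reverse_cons, List.getD_eq_getElem?_getD,
              List.getElem?_append_left hi']
      rw [this]
    simp only [List.foldl_cons, List.foldl_nil]
    rw [hcongr, ih, hget, horner_init t (0 * 3 + d), List.length_reverse]
    ring

-- Horner over A's produced digit list equals B's recursion, jointly with the place weight
theorem loop_rev3 (n : Int) :
    (solutionLoopA n []).foldl (fun acc d => acc * 3 + d) 0 = (rev3 n).1
      ∧ (3 : Int) ^ (solutionLoopA n []).length = (rev3 n).2 := by
  induction n using rev3.induct with
  | case1 n h ih =>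
    rw [solutionLoopA, if_pos h, loopA_append]
    rw [rev3, if_pos h]
    obtain ⟨ih1, ih2⟩ := ih
    constructor
    · simp only [List.foldl_append, List.foldl_cons, List.foldl_nil, List.nil_append]
      rw [horner_init, ih1, ih2]
      ring
    · simp only [List.length_append, List.nil_append, List.length_cons, List.length_nil]
      rw [pow_add, ih2]
      ring
  | case2 n h =>
    rw [solutionLoopA, if_neg h, rev3, if_neg h]
    simp

-- ===== VERDICT (by name: the statement is the Claim_ definition above) =====
theorem solution_spec : Claim_equal_solution := by
  intro n _
  show solution n = solution_alt n
  unfold solution solution_alt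
  rw [sum_rev]
  exact (loop_rev3 n).1
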